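-- pv_equiv track=rewrite | github.com/Mati2206/Matura-Informatyka | czerwiec 2023 formuła 2015/zad1.py | myStr
-- ===== SOURCE A (Python) =====
-- def myStr(a):
--     tab = []
--     m = 0
--     while a >= 10:
--         tab.append(a%10)
--         m += 1
--         a //= 10
--     tab.append(a)
--     return tab, m
-- ===== SOURCE B (Python) =====
-- def myStr(a):
--     if a < 10:
--         return [a], 0
--     s = str(a)
--     return [ord(c) - 48 for c in reversed(s)], len(s) - 1
-- ===== Notes on version B (the rewrite author's own statement) =====
-- stated objective: alternative
-- what changed: B replaces A's destructive modulo/floor-division loop by converting the number to its decimal string once and reading the digits off the reversed string (count = string length minus one), keeping A's early raw return for single-digit and negative inputs.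
import Mathlib
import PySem

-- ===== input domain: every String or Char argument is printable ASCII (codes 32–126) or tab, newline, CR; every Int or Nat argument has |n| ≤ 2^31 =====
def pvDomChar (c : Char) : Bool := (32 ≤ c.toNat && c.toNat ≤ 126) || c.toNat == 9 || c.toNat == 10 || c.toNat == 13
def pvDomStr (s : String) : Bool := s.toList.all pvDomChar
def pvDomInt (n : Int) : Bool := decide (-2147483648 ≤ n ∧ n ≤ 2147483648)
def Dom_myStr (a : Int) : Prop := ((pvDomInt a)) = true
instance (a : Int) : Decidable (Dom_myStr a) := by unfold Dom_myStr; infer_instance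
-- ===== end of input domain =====

-- B changes the algorithm (string conversion instead of a div/mod loop); equal return value on all ints.

-- ===== PORT A =====
-- A's while loop: state (tab, m), repeated a % 10 / a //= 10
def myStrLoop (a : Int) (tab : List Int) (m : Int) : List Int × Int :=
  if h : 10 ≤ a then
    myStrLoop (PySem.Int.floordiv a 10) (tab ++ [PySem.Int.mod a 10]) (m + 1)
  else (tab ++ [a], m)
termination_by a.toNat
decreasing_by
  rw [PySem.Int.floordiv_eq_ediv_of_pos (by omega : (0:Int) < 10)]
  omega

def myStr (a : Int) : List Int × Int := myStrLoop a [] 0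

-- ===== PORT B =====
def myStr_alt (a : Int) : List Int × Int :=
  if a < 10 then ([a], 0)
  else
    let s := PySem.Int.toStr a
    (s.toList.reverse.map (fun c => ((c.toNat : Int) - 48)), PySem.Str.len s - 1)

-- ===== PRECONDITION & SPEC =====
def Spec_myStr (a : Int) (out : List Int × Int) : Prop := out = myStr_alt a
instance (a : Int) (out : List Int × Int) : Decidable (Spec_myStr a out) := by unfold Spec_myStr; infer_instance

-- ===== CLAIM (what is proved, stated in full; the proofs are below) =====
def Claim_equal_myStr : Prop := ∀ (a : Int), Dom_myStr a → Spec_myStr a (myStr a)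

-- ===== LEMMAS AND PROOFS =====

-- little-endian decimal digits of a Nat, matching A's loop order
def digitsLE (n : Nat) : List Nat :=
  if h : n < 10 then [n] else n % 10 :: digitsLE (n / 10)
termination_by n
decreasing_by omega

theorem digitsLE_small {n : Nat} (h : n < 10) : digitsLE n = [n] := by
  rw [digitsLE]; simp [h]

theorem digitsLE_big {n : Nat} (h : ¬ n < 10) : digitsLE n = n % 10 :: digitsLE (n / 10) := by
  rw [digitsLE]; simp [h]

theorem digitsLE_lt (n : Nat) : ∀ d ∈ digitsLE n, d < 10 := by
  induction n using Nat.strong_induction_on with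
  | _ n ih =>
    by_cases h : n < 10
    · simp [digitsLE_small h, h]
    · rw [digitsLE_big h]
      intro d hd
      rcases List.mem_cons.mp hd with h1 | h1
      · omega
      · exact ih (n / 10) (by omega) d h1

theorem toDigitsCore_eq (fuel n : Nat) (ds : List Char) (hf : n < fuel) :
    Nat.toDigitsCore 10 fuel n ds = (digitsLE n).reverse.map Nat.digitChar ++ ds := by
  induction n using Nat.strong_induction_on generalizing fuel ds with
  | _ n ih =>
    cases fuel with
    | zero => omega
    | succ f =>
      by_cases h : n < 10
      · have h0 : n / 10 = 0 := Nat.div_eq_of_lt h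
        have hm : n % 10 = n := Nat.mod_eq_of_lt h
        simp [Nat.toDigitsCore, h0, hm, digitsLE_small h]
      · have h0 : ¬ n / 10 = 0 := by omega
        have hlt : n / 10 < n := Nat.div_lt_self (by omega) (by omega)
        simp only [Nat.toDigitsCore, h0, if_false]
        rw [ih (n / 10) hlt f _ (by omega)]
        rw [digitsLE_big h]
        simp

theorem toChars_eq {a : Int} (h : 10 ≤ a) :
    PySem.Int.toChars a = (digitsLE a.toNat).reverse.map Nat.digitChar := by
  have h1 : ¬ a < 0 := by omega
  simp only [PySem.Int.toChars, h1, if_false]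
  rw [show Nat.toDigits 10 a.toNat = Nat.toDigitsCore 10 (a.toNat + 1) a.toNat [] from rfl]
  rw [toDigitsCore_eq _ _ _ (Nat.lt_succ_self _)]
  simp

theorem digitChar_sub_48 {d : Nat} (h : d < 10) :
    ((Nat.digitChar d).toNat : Int) - 48 = (d : Int) := by
  interval_cases d <;> rfl

theorem myStrLoop_eq : ∀ (n : Nat) (a : Int), 0 ≤ a → a.toNat = n → ∀ (tab : List Int) (m : Int),
    myStrLoop a tab m =
      (tab ++ (digitsLE a.toNat).map (Nat.cast : Nat → Int),
       m + (digitsLE a.toNat).length - 1) := by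
  intro n
  induction n using Nat.strong_induction_on with
  | _ n ih =>
    intro a ha hn tab m
    by_cases h : 10 ≤ a
    · rw [myStrLoop]
      simp only [h, dif_pos]
      rw [PySem.Int.floordiv_eq_ediv_of_pos (by omega : (0:Int) < 10),
          PySem.Int.mod_eq_emod_of_pos (by omega : (0:Int) < 10)]
      rw [ih (a / 10).toNat (by omega) (a / 10) (by omega) rfl]
      rw [digitsLE_big (by omega : ¬ a.toNat < 10)]
      have e1 : (a / 10).toNat = a.toNat / 10 := by omega
      have e2 : ((a.toNat % 10 : Nat) : Int) = a % 10 := by omega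
      rw [e1]
      refine Prod.ext ?_ ?_
      · simp only [List.map_cons, List.append_assoc, List.cons_append, List.nil_append, e2]
      · simp only [List.length_cons]
        push_cast
        ring
    · rw [myStrLoop]
      simp only [h, dif_neg, not_false_iff]
      rw [digitsLE_small (by omega : a.toNat < 10)]
      have e : ((a.toNat : Nat) : Int) = a := by omega
      refine Prod.ext ?_ ?_
      · simp only [List.map_cons, List.map_nil, e]
      · simp

-- ===== VERDICT (by name: the statement is the Claim_ definition above) =====
theorem myStr_spec : Claim_equal_myStr := by
  intro a _
  unfold Spec_myStr myStr myStr_alt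
  by_cases h : a < 10
  · rw [myStrLoop]
    simp [show ¬ 10 ≤ a by omega, h]
  · simp only [h, if_false]
    rw [myStrLoop_eq a.toNat a (by omega) rfl [] 0]
    have hs : (PySem.Int.toStr a).toList = (digitsLE a.toNat).reverse.map Nat.digitChar := by
      rw [PySem.Int.toList_toStr, toChars_eq (by omega)]
    refine Prod.ext ?_ ?_
    · simp only [List.nil_append]
      rw [hs, ← List.map_reverse, List.reverse_reverse, List.map_map]
      exact (List.map_congr_left fun d hd =>
        (digitChar_sub_48 (digitsLE_lt _ d hd))).symm
    · rw [PySem.Str.len_eq, hs]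
      simp
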